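-- pv_equiv track=rewrite | github.com/dmitry-ganyushin/misc | intervals.py | find_element_binary
-- ===== SOURCE A (Python) =====
-- def find_element_binary(intervals, interval):
--     """binary search for a pair of elements"""
--     left = 0
--     right = len(intervals) - 1
--     found = False
--     while left<=right and not found:
--         middle = (left + right)//2
--         if interval[0] > intervals[middle][0]:
--             left = middle+1
--         elif interval[0] < intervals[middle][0]:
--             right = middle-1
--         elif interval[0]== intervals[middle][0]:
--             found = True
--     if found:
--         if interval[0]== intervals[middle][0] and interval[1]== intervals[middle][1]:
--             return True
--         else:
--             return False
-- ===== SOURCE B (Python) =====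
-- def find_element_binary(intervals, interval):
--     """binary search recast on a (left, size) window of nonnegative indices"""
--     def go(left, size):
--         if size == 0:
--             return None
--         k = (size - 1) // 2
--         first, second = intervals[left + k]
--         if interval[0] > first:
--             return go(left + k + 1, size - 1 - k)
--         if interval[0] < first:
--             return go(left, k)
--         return interval[1] == second
--     return go(0, len(intervals))
-- ===== Notes on version B (the rewrite author's own statement) =====
-- stated objective: alternative
-- what changed: Re-expresses the binary search on a (left, size) window of nonnegative indices with structural recursion on the window size (k = (size-1)//2), returning True/False/None directly from the base cases, instead of A's while loop over mutable left/right/found Int bounds with a post-loop re-check of the matched index.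
import Mathlib
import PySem

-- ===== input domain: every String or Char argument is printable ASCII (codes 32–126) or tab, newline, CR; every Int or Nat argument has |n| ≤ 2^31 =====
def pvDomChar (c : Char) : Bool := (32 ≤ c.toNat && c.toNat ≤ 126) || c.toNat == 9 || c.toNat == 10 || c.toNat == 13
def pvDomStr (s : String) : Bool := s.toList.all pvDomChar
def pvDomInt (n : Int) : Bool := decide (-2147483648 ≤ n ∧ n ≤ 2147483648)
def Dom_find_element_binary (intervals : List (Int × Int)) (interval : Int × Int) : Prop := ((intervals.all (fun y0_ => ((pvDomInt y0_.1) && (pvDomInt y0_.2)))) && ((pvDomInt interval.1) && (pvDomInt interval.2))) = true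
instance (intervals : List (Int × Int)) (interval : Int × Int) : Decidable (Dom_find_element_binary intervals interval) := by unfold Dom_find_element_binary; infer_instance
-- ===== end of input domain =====

-- B recasts A's while loop (mutable Int left/right/found and a post-loop re-check) as a
-- structurally recursive search on a (left, size) window of Nat indices that returns
-- the Option Bool answer directly; same midpoint index, same results.


-- ===== PORT A =====
-- A's while loop (state left/right/found/middle); returns the final `middle` when
-- found, none when the loop exits unfound.  The Nat argument is pure fuel (a totality
-- guard; the entry supplies more fuel than the loop can consume, since the span
-- strictly shrinks each iteration).  intervals[middle] is PySem.List.pyGet? (always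
-- in range on calls reachable from the entry, so the `none` arm is unreachable there).
def pvLoopA (intervals : List (Int × Int)) (x : Int) : Nat → Int → Int → Option Int
  | 0, _, _ => none
  | fuel + 1, left, right =>
    if left ≤ right then
      let middle := PySem.Int.floordiv (left + right) 2
      match PySem.List.pyGet? intervals middle with
      | none => none
      | some p =>
        if x > p.1 then pvLoopA intervals x fuel (middle + 1) right
        else if x < p.1 then pvLoopA intervals x fuel left (middle - 1)
        else some middle
    else none

def find_element_binary (intervals : List (Int × Int)) (interval : Int × Int) : Option Bool :=
  match pvLoopA intervals interval.1 (intervals.length + 1) 0 ((intervals.length : Int) - 1) with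
  | none => none
  | some middle =>
    match PySem.List.pyGet? intervals middle with
    | none => none
    | some p =>
      if interval.1 = p.1 ∧ interval.2 = p.2 then some true else some false

-- ===== PORT B =====
-- B's recursive helper go(left, size) on Nat indices, structural descent on size
-- (k = (size-1)//2, both sub-windows are strictly smaller); indices are nonnegative,
-- so intervals[left+k] is plain getElem? (the `none` arm is a totality guard only,
-- unreachable from the entry).
def pvGoB (intervals : List (Int × Int)) (x y : Int) (left size : Nat) : Option Bool :=
  if _ : size = 0 then none
  else
    let k := (size - 1) / 2
    match intervals[left + k]? with
    | none => none
    | some p =>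
      if x > p.1 then pvGoB intervals x y (left + k + 1) (size - 1 - k)
      else if x < p.1 then pvGoB intervals x y left k
      else some (decide (y = p.2))
termination_by size
decreasing_by all_goals omega

def find_element_binary_alt (intervals : List (Int × Int)) (interval : Int × Int) : Option Bool :=
  pvGoB intervals interval.1 interval.2 0 intervals.length

-- ===== PRECONDITION & SPEC =====
def Spec_find_element_binary (intervals : List (Int × Int)) (interval : Int × Int) (out : Option Bool) : Prop := out = find_element_binary_alt intervals interval
instance (intervals : List (Int × Int)) (interval : Int × Int) (out : Option Bool) : Decidable (Spec_find_element_binary intervals interval out) := by unfold Spec_find_element_binary; infer_instance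

-- ===== CLAIM (what is proved, stated in full; the proofs are below) =====
def Claim_equal_find_element_binary : Prop := ∀ (intervals : List (Int × Int)) (interval : Int × Int), Dom_find_element_binary intervals interval → Spec_find_element_binary intervals interval (find_element_binary intervals interval)

-- ===== LEMMAS AND PROOFS =====
-- B's window search equals A's loop followed by A's post-loop check: on the window
-- [left, left+size), with enough fuel, pvGoB returns exactly what A's entry computes
-- from pvLoopA's index.
theorem pvGo_eq_loop (intervals : List (Int × Int)) (x y : Int) :
    ∀ (size fuel left : Nat), size ≤ fuel →
      pvGoB intervals x y left size =
        match pvLoopA intervals x fuel (left : Int) ((left : Int) + (size : Int) - 1) with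
        | none => none
        | some m =>
          match PySem.List.pyGet? intervals m with
          | none => none
          | some p => if x = p.1 ∧ y = p.2 then some true else some false := by
  intro size
  induction size using Nat.strong_induction_on with
  | _ size ih =>
    intro fuel left hfuel
    match size, fuel with
    | 0, fuel =>
      rw [pvGoB]
      cases fuel with
      | zero => simp [pvLoopA]
      | succ f =>
        rw [pvLoopA, if_neg (by push_cast; omega : ¬ (left : Int) ≤ (left : Int) + (0 : Nat) - 1)]
        simp
    | s + 1, f + 1 =>
      rw [pvGoB]
      rw [pvLoopA, if_pos (by push_cast; omega : (left : Int) ≤ (left : Int) + ((s+1 : Nat) : Int) - 1)]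
      have hmid : PySem.Int.floordiv ((left : Int) + ((left : Int) + ((s+1 : Nat) : Int) - 1)) 2
          = ((left + s / 2 : Nat) : Int) := by
        have h1 : ((left : Int) + ((left : Int) + ((s+1 : Nat) : Int) - 1))
            = ((2 * left + s : Nat) : Int) := by push_cast; ring
        rw [h1]
        have := PySem.Int.floordiv_natCast (2 * left + s) 2
        rw [show ((2:Nat):Int) = (2:Int) from rfl] at this
        rw [this]
        congr 1
        omega
      rw [hmid]
      have hk : (s + 1 - 1) / 2 = s / 2 := by omega
      simp only [dif_neg (Nat.succ_ne_zero s), hk, PySem.List.pyGet?_natCast]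
      cases hp : intervals[left + s / 2]? with
      | none => simp
      | some p =>
        simp only []
        by_cases h1 : x > p.1
        · rw [if_pos h1, if_pos h1]
          have harg : ((left + s / 2 : Nat) : Int) + 1 = ((left + s / 2 + 1 : Nat) : Int) := by
            push_cast; ring
          have harg2 : (left : Int) + ((s+1 : Nat) : Int) - 1
              = ((left + s / 2 + 1 : Nat) : Int) + ((s + 1 - 1 - s / 2 : Nat) : Int) - 1 := by
            push_cast [Nat.lt_succ_iff]
            have : s / 2 ≤ s := Nat.div_le_self s 2
            omega
          rw [harg, harg2]
          exact ih (s + 1 - 1 - s / 2) (by omega) f _ (by omega)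
        · rw [if_neg h1, if_neg h1]
          by_cases h2 : x < p.1
          · rw [if_pos h2, if_pos h2]
            have harg : ((left + s / 2 : Nat) : Int) - 1
                = (left : Int) + ((s / 2 : Nat) : Int) - 1 := by push_cast; ring
            rw [harg]
            exact ih (s / 2) (by omega) f _ (by omega)
          · rw [if_neg h2, if_neg h2]
            have hx : x = p.1 := le_antisymm (not_lt.mp h1) (not_lt.mp h2)
            simp only [PySem.List.pyGet?_natCast, hp]
            by_cases hy : y = p.2
            · rw [if_pos ⟨hx, hy⟩]; simp [hy]
            · rw [if_neg (by tauto)]; simp [hy]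

-- ===== VERDICT (by name: the statement is the Claim_ definition above) =====
theorem find_element_binary_spec : Claim_equal_find_element_binary := by
  intro intervals interval _
  unfold Spec_find_element_binary find_element_binary find_element_binary_alt
  rw [pvGo_eq_loop intervals interval.1 interval.2 intervals.length (intervals.length + 1) 0
        (by omega)]
  norm_num
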